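-- pv_equiv track=rewrite | github.com/bhvbhushan/genai-labs | src/schema.py | _is_contiguous_int_run
-- ===== SOURCE A (Python) =====
-- def _is_contiguous_int_run(values: tuple[str, ...]) -> bool:
--     """True when all strings parse as integers forming a gap-free run."""
--     if not values:
--         return False
--     try:
--         ints = sorted(int(v) for v in values)
--     except ValueError:
--         return False
--     return ints == list(range(ints[0], ints[-1] + 1))
-- ===== SOURCE B (Python) =====
-- def _is_contiguous_int_run(values: tuple[str, ...]) -> bool:
--     """True when all strings parse as integers forming a gap-free run."""
--     if not values:
--         return False
--     try:
--         parsed = [int(v) for v in values]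
--     except ValueError:
--         return False
--     n = len(parsed)
--     return max(parsed) - min(parsed) + 1 == n and len(set(parsed)) == n
-- ===== Notes on version B (the rewrite author's own statement) =====
-- stated objective: simpler
-- what changed: Replaces sort-then-compare-against-range with a single min/max span check plus a set-cardinality duplicate check, avoiding the sort and the materialised range list.
import Mathlib
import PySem

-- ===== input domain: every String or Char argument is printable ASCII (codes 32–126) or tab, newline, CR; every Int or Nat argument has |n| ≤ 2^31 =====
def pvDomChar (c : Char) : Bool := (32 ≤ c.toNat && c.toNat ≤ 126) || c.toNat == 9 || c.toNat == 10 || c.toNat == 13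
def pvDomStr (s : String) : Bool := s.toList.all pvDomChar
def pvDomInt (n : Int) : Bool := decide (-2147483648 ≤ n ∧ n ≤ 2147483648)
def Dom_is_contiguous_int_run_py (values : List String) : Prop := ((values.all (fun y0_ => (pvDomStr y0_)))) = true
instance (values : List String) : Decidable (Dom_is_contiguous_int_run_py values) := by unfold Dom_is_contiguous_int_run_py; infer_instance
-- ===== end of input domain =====

-- B replaces A's sort-then-compare-against-range with a min/max span check plus a
-- set-cardinality duplicate check (simpler: no sort, no materialised range list).

-- ===== PORT A =====
def is_contiguous_int_run_py (values : List String) : Bool :=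
  if values = [] then false
  else
    match values.mapM PySem.Int.ofStr? with
    | none => false   -- ValueError from int(v)
    | some parsed =>
      let ints := PySem.List.sorted parsed (fun x => x) false
      -- ints[0] / ints[-1]: ints is nonempty here, so pyGetD is exact
      decide (ints = PySem.List.pyRange (PySem.List.pyGetD ints 0 0)
                       (PySem.List.pyGetD ints (-1) 0 + 1) 1)

-- ===== PORT B =====
def is_contiguous_int_run_py_alt (values : List String) : Bool :=
  if values = [] then false
  else
    match values.mapM PySem.Int.ofStr? with
    | none => false   -- ValueError from int(v)
    | some parsed =>
      let n : Int := parsed.length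
      match PySem.List.max? parsed (fun x => x), PySem.List.min? parsed (fun x => x) with
      | some hi, some lo =>
        decide (hi - lo + 1 = n) && decide (((PySem.Set.ofList parsed : List Int).length : Int) = n)
      | _, _ => false   -- unreachable: parsed is nonempty here

-- ===== PRECONDITION & SPEC =====
def Spec_is_contiguous_int_run_py (values : List String) (out : Bool) : Prop := out = is_contiguous_int_run_py_alt values
instance (values : List String) (out : Bool) : Decidable (Spec_is_contiguous_int_run_py values out) := by unfold Spec_is_contiguous_int_run_py; infer_instance

-- ===== CLAIM (what is proved, stated in full; the proofs are below) =====
def Claim_equal_is_contiguous_int_run_py : Prop := ∀ (values : List String), Dom_is_contiguous_int_run_py values → Spec_is_contiguous_int_run_py values (is_contiguous_int_run_py values)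

-- ===== LEMMAS AND PROOFS =====

theorem mapM_some_length {α β : Type} {f : α → Option β} {l : List α} {l' : List β}
    (h : l.mapM f = some l') : l'.length = l.length := by
  induction l generalizing l' with
  | nil => simp at h; simp [← h]
  | cons a t ih =>
    rw [List.mapM_cons] at h
    cases hfa : f a with
    | none => simp [hfa] at h
    | some b =>
      simp [hfa, Option.bind] at h
      cases hmt : t.mapM f with
      | none => simp [hmt] at h
      | some bs =>
        simp [hmt] at h
        simp [← h, ih hmt]

theorem pyGetD_zero (s : List Int) (h : s ≠ []) :
    PySem.List.pyGetD s 0 0 = s.head h := by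
  cases s with
  | nil => exact absurd rfl h
  | cons a t => simp [PySem.List.pyGetD, PySem.List.pyGet?, PySem.List.pyIdx?]

theorem pyGetD_neg_one (s : List Int) (h : s ≠ []) :
    PySem.List.pyGetD s (-1) 0 = s.getLast h := by
  have hl : 1 ≤ s.length := List.length_pos_iff.mpr h
  simp [PySem.List.pyGetD, PySem.List.pyGet?, PySem.List.pyIdx?, hl,
    ← List.getLast?_eq_getElem?, List.getLast?_eq_some_getLast h]

theorem head_sorted_min (xs : List Int) (lo : Int)
    (hmin : PySem.List.min? xs (fun x => x) = some lo)
    (h : PySem.List.sorted xs (fun x => x) false ≠ []) :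
    (PySem.List.sorted xs (fun x => x) false).head h = lo := by
  obtain ⟨m, t, hs⟩ := List.exists_cons_of_ne_nil h
  have hmem : m ∈ xs := (PySem.List.mem_sorted xs (fun x => x) false m).mp
      (by rw [hs]; exact List.mem_cons_self)
  have h1 : lo ≤ m := PySem.List.min?_isMin hmin m hmem
  have h2 : m ≤ lo := PySem.List.key_head_sorted_le xs (fun x => x) hs lo (PySem.List.min?_mem hmin)
  simp [hs]; omega

theorem getLast_sorted_max (xs : List Int) (hi : Int)
    (hmax : PySem.List.max? xs (fun x => x) = some hi)
    (h : PySem.List.sorted xs (fun x => x) false ≠ []) :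
    (PySem.List.sorted xs (fun x => x) false).getLast h = hi := by
  have hlast_mem : (PySem.List.sorted xs (fun x => x) false).getLast h ∈ xs :=
    (PySem.List.mem_sorted xs (fun x => x) false _).mp (List.getLast_mem h)
  have h1 : (PySem.List.sorted xs (fun x => x) false).getLast h ≤ hi :=
    PySem.List.max?_isMax hmax _ hlast_mem
  have h2 : hi ≤ (PySem.List.sorted xs (fun x => x) false).getLast h := by
    have hhimem : hi ∈ PySem.List.sorted xs (fun x => x) false :=
      (PySem.List.mem_sorted xs (fun x => x) false hi).mpr (PySem.List.max?_mem hmax)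
    obtain ⟨i, hilt, hie⟩ := List.mem_iff_getElem.mp hhimem
    have hmono := PySem.List.key_sorted_getElem_mono xs (fun x => x)
      (p := i) (q := (PySem.List.sorted xs (fun x => x) false).length - 1) (by omega) (by omega)
    rw [List.getLast_eq_getElem]
    rw [hie] at hmono
    exact hmono
  omega

theorem ofList_length_eq_iff (xs : List Int) :
    (PySem.Set.ofList xs : List Int).length = xs.length ↔ xs.Nodup := by
  constructor
  · intro hlen
    have hfin : (PySem.Set.ofList xs : List Int).toFinset = xs.toFinset := by
      ext x; simp [List.mem_toFinset, PySem.Set.mem_ofList]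
    have hcard : (PySem.Set.ofList xs : List Int).toFinset.card = (PySem.Set.ofList xs : List Int).length :=
      List.toFinset_card_of_nodup (PySem.Set.nodup_ofList xs)
    have hcard2 : xs.toFinset.card = xs.length := by rw [← hfin, hcard, hlen]
    have hd : xs.dedup.length = xs.length := by
      have := (List.card_toFinset xs).symm
      omega
    have : xs.dedup = xs := (List.dedup_sublist xs).eq_of_length hd
    rw [← this]; exact List.nodup_dedup xs
  · intro hnd; rw [PySem.Set.ofList_eq_self_of_nodup xs hnd]

theorem main_iff (xs : List Int) (lo hi : Int)
    (hmin : PySem.List.min? xs (fun x => x) = some lo)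
    (hmax : PySem.List.max? xs (fun x => x) = some hi) :
    (PySem.List.sorted xs (fun x => x) false = PySem.List.pyRange lo (hi + 1) 1)
      ↔ (hi - lo + 1 = (xs.length : Int) ∧ xs.Nodup) := by
  have hperm := PySem.List.sorted_perm xs (fun x => x) false
  have hlole : lo ≤ hi := le_trans
    (PySem.List.min?_isMin hmin hi (PySem.List.max?_mem hmax)) (le_refl hi)
  constructor
  · intro h
    have hnd : xs.Nodup := (hperm.nodup_iff).mp (by rw [h]; exact PySem.List.nodup_pyRange_one lo (hi+1))
    refine ⟨?_, hnd⟩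
    have hlen : xs.length = (PySem.List.pyRange lo (hi + 1) 1).length := by
      rw [← h]; exact (hperm.length_eq).symm
    rw [PySem.List.length_pyRange_one] at hlen
    omega
  · rintro ⟨hspan, hnd⟩
    have hsub : xs ⊆ PySem.List.pyRange lo (hi + 1) 1 := by
      intro x hx
      rw [PySem.List.mem_pyRange_one]
      exact ⟨PySem.List.min?_isMin hmin x hx, by
        have := PySem.List.max?_isMax hmax x hx; omega⟩
    have hsp : xs.Subperm (PySem.List.pyRange lo (hi + 1) 1) := hnd.subperm hsub
    have hlen : (PySem.List.pyRange lo (hi + 1) 1).length ≤ xs.length := by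
      rw [PySem.List.length_pyRange_one]; omega
    have hpm : (PySem.List.pyRange lo (hi + 1) 1).Perm xs := (hsp.perm_of_length_le hlen).symm
    exact PySem.List.sorted_eq_of_perm_of_pairwise_lt xs _ (fun x => x) hpm
      (PySem.List.pairwise_lt_pyRange_one lo (hi+1))

-- ===== VERDICT (by name: the statement is the Claim_ definition above) =====
theorem is_contiguous_int_run_py_spec : Claim_equal_is_contiguous_int_run_py := by
  intro values _
  unfold Spec_is_contiguous_int_run_py is_contiguous_int_run_py is_contiguous_int_run_py_alt
  by_cases hv : values = []
  · simp [hv]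
  · simp only [if_neg hv]
    cases hm : values.mapM PySem.Int.ofStr? with
    | none => rfl
    | some parsed =>
      have hlen := mapM_some_length hm
      have hpne : parsed ≠ [] := by
        intro h; apply hv
        rw [h] at hlen
        exact List.eq_nil_of_length_eq_zero hlen.symm
      obtain ⟨hi, hmax⟩ : ∃ hi, PySem.List.max? parsed (fun x => x) = some hi := by
        cases h : PySem.List.max? parsed (fun x => x) with
        | none => exact absurd ((PySem.List.max?_eq_none_iff parsed _).mp h) hpne
        | some v => exact ⟨v, rfl⟩
      obtain ⟨lo, hmin⟩ : ∃ lo, PySem.List.min? parsed (fun x => x) = some lo := by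
        cases h : PySem.List.min? parsed (fun x => x) with
        | none => exact absurd ((PySem.List.min?_eq_none_iff parsed _).mp h) hpne
        | some v => exact ⟨v, rfl⟩
      have hsne : PySem.List.sorted parsed (fun x => x) false ≠ [] := by
        rw [Ne, PySem.List.sorted_eq_nil_iff]; exact hpne
      simp only []
      rw [hmax, hmin, pyGetD_zero _ hsne, pyGetD_neg_one _ hsne,
        head_sorted_min parsed lo hmin hsne, getLast_sorted_max parsed hi hmax hsne]
      have hiff : (PySem.List.sorted parsed (fun x => x) false = PySem.List.pyRange lo (hi + 1) 1)
          ↔ (hi - lo + 1 = (parsed.length : Int) ∧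
             ((PySem.Set.ofList parsed : List Int).length : Int) = (parsed.length : Int)) := by
        rw [main_iff parsed lo hi hmin hmax, Int.natCast_inj, ofList_length_eq_iff]
      rw [decide_eq_decide.mpr hiff, Bool.decide_and]
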